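-- pv_equiv track=rewrite | github.com/Hoony0321/Algorithm | 2021_10/2021_10_26/baekjoon_8958.py | ReturnQuizScore
-- ===== SOURCE A (Python) =====
-- def ReturnQuizScore(case):
--   score = 0;
--   addValue = 0;
--   for answer in case:
--     if answer == 'X':
--       addValue = 0;
--     else:
--       addValue += 1;
--       score += addValue;
--
--   return score;
-- ===== SOURCE B (Python) =====
-- from itertools import groupby
--
-- def ReturnQuizScore(case):
--     score = 0
--     for is_x, grp in groupby(case, key=lambda c: c == 'X'):
--         if not is_x:
--             L = sum(1 for _ in grp)
--             score += L * (L + 1) // 2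
--     return score
-- ===== Notes on version B (the rewrite author's own statement) =====
-- stated objective: simpler
-- what changed: Replaces the per-character running addValue/score accumulator with itertools.groupby runs of non-X answers, adding the closed-form triangular number L*(L+1)//2 per run.
import Mathlib
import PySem

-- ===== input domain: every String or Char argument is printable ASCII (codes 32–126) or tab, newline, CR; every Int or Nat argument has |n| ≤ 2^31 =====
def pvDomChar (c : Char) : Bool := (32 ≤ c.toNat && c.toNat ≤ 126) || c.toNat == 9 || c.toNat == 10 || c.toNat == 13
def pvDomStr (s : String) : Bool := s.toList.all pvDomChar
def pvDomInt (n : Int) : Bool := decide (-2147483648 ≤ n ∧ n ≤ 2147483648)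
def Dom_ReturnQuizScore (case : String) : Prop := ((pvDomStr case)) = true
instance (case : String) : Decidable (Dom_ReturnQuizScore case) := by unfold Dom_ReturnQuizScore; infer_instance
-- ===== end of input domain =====

-- B replaces A's per-character running accumulator by groupby runs with a closed-form
-- triangular number per run of correct answers (objective: simpler).

-- ===== PORT A =====
-- literal transliteration: one pass keeping (score, addValue)
def ReturnQuizScore (case : String) : Int :=
  (case.toList.foldl
    (fun st answer =>
      if answer = 'X' then (st.1, 0) else (st.1 + st.2 + 1, st.2 + 1))
    ((0 : Int), (0 : Int))).1

-- ===== PORT B =====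
-- groupby over the key c == 'X': take the maximal run of equal key, score a non-X run
-- of length L as L*(L+1)//2 (Python //; exact via PySem.Int.floordiv), recurse on the rest.
def pvAltGo : List Char → Int
  | [] => 0
  | c :: t =>
    let k : Bool := c == 'X'
    let run := t.takeWhile (fun x => (x == 'X') == k)
    let rest := t.dropWhile (fun x => (x == 'X') == k)
    (if k then 0
     else
       let L : Int := (run.length : Int) + 1
       PySem.Int.floordiv (L * (L + 1)) 2) + pvAltGo rest
termination_by l => l.length
decreasing_by
  have := List.length_dropWhile_le (fun x => (x == 'X') == (c == 'X')) t
  simp only [List.length_cons]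
  omega

def ReturnQuizScore_alt (case : String) : Int := pvAltGo case.toList

-- ===== PRECONDITION & SPEC =====
def Spec_ReturnQuizScore (case : String) (out : Int) : Prop := out = ReturnQuizScore_alt case
instance (case : String) (out : Int) : Decidable (Spec_ReturnQuizScore case out) := by unfold Spec_ReturnQuizScore; infer_instance

-- ===== CLAIM (what is proved, stated in full; the proofs are below) =====
def Claim_equal_ReturnQuizScore : Prop := ∀ (case : String), Dom_ReturnQuizScore case → Spec_ReturnQuizScore case (ReturnQuizScore case)

-- ===== LEMMAS AND PROOFS =====

lemma pvAltGo_nil : pvAltGo [] = 0 := by rw [pvAltGo]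

lemma pvAltGo_cons (c : Char) (t : List Char) :
    pvAltGo (c :: t)
      = (if (c == 'X') then 0
         else
           PySem.Int.floordiv
             ((((t.takeWhile (fun x => (x == 'X') == (c == 'X'))).length : Int) + 1)
              * ((((t.takeWhile (fun x => (x == 'X') == (c == 'X'))).length : Int) + 1) + 1)) 2)
        + pvAltGo (t.dropWhile (fun x => (x == 'X') == (c == 'X'))) := by
  rw [pvAltGo]

lemma pvKeyX : (fun x => (x == 'X') == ('X' == 'X')) = (fun x : Char => x == 'X') := by
  funext x; simp

/-- A's loop body. -/
def pvStep (st : Int × Int) (answer : Char) : Int × Int :=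
  if answer = 'X' then (st.1, 0) else (st.1 + st.2 + 1, st.2 + 1)

/-- triangular numbers, recursively -/
def pvT : Nat → Int
  | 0 => 0
  | n + 1 => pvT n + (n + 1)

lemma pvT_closed (n : Nat) :
    PySem.Int.floordiv (((n : Int)) * ((n : Int) + 1)) 2 = pvT n := by
  induction n with
  | zero => decide
  | succ m ih =>
    rw [PySem.Int.floordiv_eq_ediv_of_pos (by omega)] at ih ⊢
    push_cast
    rw [show ((m:Int)+1)*((m:Int)+1+1) = (m:Int)*((m:Int)+1) + ((m:Int)+1)*2 from by ring,
      Int.add_mul_ediv_right _ _ (by norm_num : (2:Int) ≠ 0), ih]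
    simp [pvT]

lemma fold_run (run : List Char) (rest : List Char) (s a : Int)
    (h : ∀ x ∈ run, ¬ x = 'X') :
    List.foldl pvStep (s, a) (run ++ rest)
      = List.foldl pvStep (s + (run.length : Int) * a + pvT run.length,
                           a + run.length) rest := by
  induction run generalizing s a with
  | nil => simp [pvT]
  | cons c t ih =>
    have hc : ¬ c = 'X' := h c (List.mem_cons_self ..)
    have ht : ∀ x ∈ t, ¬ x = 'X' := fun x hx => h x (List.mem_cons_of_mem _ hx)
    simp only [List.cons_append, List.foldl_cons, pvStep, if_neg hc]
    rw [ih _ _ ht]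
    congr 1
    simp only [List.length_cons, Prod.mk.injEq]
    refine ⟨?_, ?_⟩
    · rw [show pvT (t.length + 1) = pvT t.length + ((t.length : Int) + 1) from rfl]
      push_cast; ring
    · push_cast; ring

lemma pvAltGo_dropX (t : List Char) :
    pvAltGo (t.dropWhile (fun x => x == 'X')) = pvAltGo t := by
  cases t with
  | nil => simp
  | cons c u =>
    by_cases hc : c = 'X'
    · subst hc
      rw [List.dropWhile_cons_of_pos (by decide), pvAltGo_cons,
        if_pos (by decide), pvKeyX, zero_add]
    · rw [List.dropWhile_cons_of_neg (by simpa using hc)]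

lemma main_fold (l : List Char) (s : Int) :
    (List.foldl pvStep (s, 0) l).1 = s + pvAltGo l := by
  induction hn : l.length using Nat.strong_induction_on generalizing l s with
  | _ n ih =>
    cases l with
    | nil => simp [pvAltGo_nil]
    | cons c t =>
      by_cases hc : c = 'X'
      · subst hc
        have h1 : List.foldl pvStep (s, 0) ('X' :: t) = List.foldl pvStep (s, 0) t := by
          simp [pvStep]
        rw [h1, pvAltGo_cons, if_pos (by decide), pvKeyX, zero_add, pvAltGo_dropX]
        exact ih t.length (by simp at hn; omega) _ _ rfl
      · have hk : (c == 'X') = false := by simpa using hc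
        set p : Char → Bool := fun x => (x == 'X') == (c == 'X') with hp
        have hsplit : t = t.takeWhile p ++ t.dropWhile p := (List.takeWhile_append_dropWhile).symm
        have hrunNX : ∀ x ∈ c :: t.takeWhile p, ¬ x = 'X' := by
          intro x hx
          rcases List.mem_cons.mp hx with h | h
          · simpa [h] using hc
          · have := List.mem_takeWhile_imp h
            simp [hp, hk] at this
            simpa using this
        have hA : List.foldl pvStep (s, 0) (c :: t)
            = List.foldl pvStep
                (s + ((c :: t.takeWhile p).length : Int) * 0 + pvT (c :: t.takeWhile p).length,
                 0 + (c :: t.takeWhile p).length) (t.dropWhile p) := by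
          conv_lhs => rw [show c :: t = (c :: t.takeWhile p) ++ t.dropWhile p by
            simp [← hsplit]]
          exact fold_run _ _ _ _ hrunNX
        have hTri : PySem.Int.floordiv ((((t.takeWhile p).length : Int) + 1)
              * ((((t.takeWhile p).length : Int) + 1) + 1)) 2
            = pvT ((t.takeWhile p).length + 1) := by
          have := pvT_closed ((t.takeWhile p).length + 1)
          push_cast at this
          exact_mod_cast this
        rw [hA, pvAltGo_cons, if_neg (by simp [hk]), ← hp, hTri]
        rcases hrest : t.dropWhile p with _ | ⟨d, v⟩
        · rw [pvAltGo_nil]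
          simp [List.length_cons]
        · have hdl : (t.dropWhile p).length ≤ t.length := List.length_dropWhile_le _ _
          have hd : d = 'X' := by
            have := List.head?_dropWhile_not p t
            rw [hrest] at this
            simp [hp, hk] at this
            simpa using this
          subst hd
          have hstep : List.foldl pvStep
              (s + ((c :: t.takeWhile p).length : Int) * 0 + pvT (c :: t.takeWhile p).length,
               0 + ((c :: t.takeWhile p).length : Int)) ('X' :: v)
            = List.foldl pvStep
              (s + ((c :: t.takeWhile p).length : Int) * 0 + pvT (c :: t.takeWhile p).length, 0) v := by
            simp [pvStep]
          rw [hstep]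
          have hvn : v.length < n := by
            have h2 : ('X' :: v).length ≤ t.length := hrest ▸ hdl
            simp at h2 hn
            omega
          rw [ih v.length hvn v _ rfl]
          rw [pvAltGo_cons, if_pos (by decide), pvKeyX, zero_add, pvAltGo_dropX]
          simp only [List.length_cons]
          push_cast
          ring

-- ===== VERDICT (by name: the statement is the Claim_ definition above) =====
theorem ReturnQuizScore_spec : Claim_equal_ReturnQuizScore := by
  intro case _
  unfold Spec_ReturnQuizScore ReturnQuizScore ReturnQuizScore_alt
  have := main_fold case.toList 0
  simpa [pvStep] using this
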